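-- pv_equiv track=rewrite | github.com/Madhax/Kata | binarysearch-contests/weekly-43/1.py | solve
-- ===== SOURCE A (Python) =====
-- def solve(contacts):
--     seen = set()
--     unique = 0
--     for contact in contacts:
--         if len(set(contact) & seen) == 0:
--             unique+=1
--         seen |= set(contact)
--
--
--     return unique
-- ===== SOURCE B (Python) =====
-- def solve(contacts):
--     first_index = {}
--     for i, contact in enumerate(contacts):
--         for x in contact:
--             if x not in first_index:
--                 first_index[x] = i
--     count = 0
--     for i, contact in enumerate(contacts):
--         if all(first_index[x] == i for x in contact):
--             count += 1
--     return count
-- ===== Notes on version B (the rewrite author's own statement) =====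
-- stated objective: alternative
-- what changed: Replaces the incrementally grown 'seen' set and per-contact set intersection with a precomputed first-occurrence-index dict built in one pass, then a second pass counting contacts whose every character first occurs in that contact.
import Mathlib
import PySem

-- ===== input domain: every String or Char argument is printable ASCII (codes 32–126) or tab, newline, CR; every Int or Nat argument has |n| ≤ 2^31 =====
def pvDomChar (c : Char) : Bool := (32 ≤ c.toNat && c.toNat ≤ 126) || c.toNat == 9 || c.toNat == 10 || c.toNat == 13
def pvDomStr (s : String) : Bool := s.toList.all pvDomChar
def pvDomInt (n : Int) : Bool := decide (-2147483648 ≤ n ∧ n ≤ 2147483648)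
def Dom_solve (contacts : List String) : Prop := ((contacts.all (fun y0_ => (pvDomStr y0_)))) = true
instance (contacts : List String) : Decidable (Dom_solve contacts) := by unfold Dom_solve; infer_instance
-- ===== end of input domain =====

-- B replaces A's incrementally grown 'seen' set (with per-contact set intersection) by a
-- precomputed first-occurrence-index dict and a second counting pass: a different decomposition, same cost.

-- ===== PORT A =====
def solveStepA (st : PySem.Set Char × Int) (contact : String) : PySem.Set Char × Int :=
  let unique := if PySem.Set.len (PySem.Set.inter (PySem.Set.ofList contact.toList) st.1) == 0
                then st.2 + 1 else st.2
  (PySem.Set.union st.1 (PySem.Set.ofList contact.toList), unique)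

def solve (contacts : List String) : Int :=
  (contacts.foldl solveStepA (PySem.Set.empty, 0)).2

-- ===== PORT B =====
def solveFirstIndex (contacts : List String) : PySem.Dict Char Int :=
  (PySem.List.enumerate contacts).foldl
    (fun d p => p.2.toList.foldl (fun d x => if d.contains x then d else d.insert x p.1) d)
    PySem.Dict.empty

-- first_index[x] in Source B is always a hit (x was recorded in the first pass), so getD's default is never used
def solve_alt (contacts : List String) : Int :=
  let fi := solveFirstIndex contacts
  (PySem.List.enumerate contacts).foldl
    (fun count p => if p.2.toList.all (fun x => fi.getD x (-1) == p.1) then count + 1 else count)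
    0

-- ===== PRECONDITION & SPEC =====
def Spec_solve (contacts : List String) (out : Int) : Prop := out = solve_alt contacts
instance (contacts : List String) (out : Int) : Decidable (Spec_solve contacts out) := by unfold Spec_solve; infer_instance

-- ===== CLAIM (what is proved, stated in full; the proofs are below) =====
def Claim_equal_solve : Prop := ∀ (contacts : List String), Dom_solve contacts → Spec_solve contacts (solve contacts)

-- ===== LEMMAS AND PROOFS =====

def pvChars (l : List String) : List Char := l.flatMap String.toList
def pvSpec (seen : List Char) : List String → Int
  | [] => 0
  | c :: rest =>
      (if c.toList.all (fun x => decide (x ∉ seen)) then 1 else 0) + pvSpec (seen ++ c.toList) rest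

theorem pvAll_congr (l : List Char) (p q : Char → Bool) (h : ∀ x ∈ l, p x = q x) :
    l.all p = l.all q := by
  induction l with
  | nil => rfl
  | cons a l ih => simp only [List.all_cons, h a (by simp), ih (fun x hx => h x (by simp [hx]))]

theorem solveA_eq (cs : List String) :
    ∀ (s : PySem.Set Char) (seen : List Char) (u : Int), (∀ x, x ∈ s ↔ x ∈ seen) →
      (cs.foldl solveStepA (s, u)).2 = u + pvSpec seen cs := by
  induction cs with
  | nil => intro s seen u h; simp [pvSpec]
  | cons c rest ih =>
    intro s seen u h
    simp only [List.foldl_cons, pvSpec]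
    rw [show (List.foldl solveStepA (solveStepA (s, u) c) rest) =
         (List.foldl solveStepA ((PySem.Set.union s (PySem.Set.ofList c.toList),
           if PySem.Set.len (PySem.Set.inter (PySem.Set.ofList c.toList) s) == 0
           then u + 1 else u)) rest) from rfl]
    rw [ih _ (seen ++ c.toList) _ (by
      intro x
      simp [PySem.Set.mem_union, PySem.Set.mem_ofList, List.mem_append, h x])]
    have hcond : (PySem.Set.len (PySem.Set.inter (PySem.Set.ofList c.toList) s) == 0) =
        (c.toList.all fun x => decide (x ∉ seen)) := by
      by_cases hall : ∀ x ∈ c.toList, x ∉ seen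
      · have hnil : PySem.Set.inter (PySem.Set.ofList c.toList) s = [] := by
          apply List.eq_nil_iff_forall_not_mem.mpr
          intro x hx
          rw [PySem.Set.mem_inter, PySem.Set.mem_ofList] at hx
          exact hall x hx.1 ((h x).mp hx.2)
        have hl : (c.toList.all fun x => decide (x ∉ seen)) = true := by
          simp only [List.all_eq_true, decide_eq_true_eq]; exact hall
        rw [hl]; simp [PySem.Set.len, hnil]
      · push Not at hall
        obtain ⟨x, hx, hxs⟩ := hall
        have hmem : x ∈ PySem.Set.inter (PySem.Set.ofList c.toList) s := by
          rw [PySem.Set.mem_inter, PySem.Set.mem_ofList]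
          exact ⟨hx, (h x).mpr hxs⟩
        have hne : (PySem.Set.inter (PySem.Set.ofList c.toList) s).length ≠ 0 := by
          intro h0; rw [List.length_eq_zero_iff] at h0; simp [h0] at hmem
        have hr : (c.toList.all fun x => decide (x ∉ seen)) = false := by
          simp only [List.all_eq_false]; exact ⟨x, hx, by simp [hxs]⟩
        rw [hr]
        simp [PySem.Set.len, hne]
    rw [hcond]
    split <;> ring

def pvFirstIdx (s : Int) : List String → Char → Option Int
  | [] => fun _ => none
  | c :: rest => fun x => if x ∈ c.toList then some s else pvFirstIdx (s + 1) rest x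

theorem pvFirstIdx_some : ∀ (cs : List String) (s j : Int) (x : Char),
    pvFirstIdx s cs x = some j → s ≤ j ∧ j < s + cs.length := by
  intro cs
  induction cs with
  | nil => intro s j x h; simp [pvFirstIdx] at h
  | cons c rest ih =>
    intro s j x h
    simp only [pvFirstIdx] at h
    split at h
    · obtain rfl := Option.some.inj h; constructor <;> simp
    · obtain ⟨h1, h2⟩ := ih (s + 1) j x h
      constructor <;> [omega; (simp only [List.length_cons]; push_cast; omega)]

theorem pvFirstIdx_append : ∀ (pre : List String) (rest : List String) (s : Int) (x : Char),
    pvFirstIdx s (pre ++ rest) x =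
      if x ∈ pvChars pre then pvFirstIdx s pre x else pvFirstIdx (s + pre.length) rest x := by
  intro pre
  induction pre with
  | nil => intro rest s x; simp [pvChars]
  | cons c pre ih =>
    intro rest s x
    simp only [List.cons_append, pvFirstIdx, pvChars, List.flatMap_cons, List.mem_append]
    by_cases hc : x ∈ c.toList
    · simp [hc]
    · rw [if_neg hc, ih rest (s + 1) x]
      simp only [pvChars, hc, false_or, List.length_cons]
      split <;> [rfl; (congr 1; push_cast; ring)]

theorem inner_get? : ∀ (l : List Char) (d : PySem.Dict Char Int) (i : Int) (y : Char),
      (l.foldl (fun d x => if d.contains x then d else d.insert x i) d).get? y =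
        if d.contains y then d.get? y else if y ∈ l then some i else none := by
  intro l
  induction l with
  | nil => intro d i y; by_cases h : d.contains y <;> simp [h, PySem.Dict.get?_eq_none_iff_contains]
  | cons a l ih =>
    intro d i y
    simp only [List.foldl_cons]
    by_cases ha : d.contains a
    · rw [if_pos ha, ih]
      by_cases hy : d.contains y
      · simp [hy]
      · have hya : y ≠ a := fun e => hy (e ▸ ha)
        simp [hy, List.mem_cons, hya]
    · rw [if_neg ha, ih]
      by_cases hya : y = a
      · subst hya
        simp [PySem.Dict.contains_insert_self, PySem.Dict.get?_insert_self, ha]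
      · have hc : (d.insert a i).contains y = d.contains y := by
          rw [PySem.Dict.contains_insert]; simp [hya]
        rw [hc, PySem.Dict.get?_insert_of_ne]
        · by_cases hy : d.contains y
          · simp [hy]
          · simp [hy, List.mem_cons, hya]
        · exact hya

theorem pvFirstIdx_mem : ∀ (pre : List String) (s : Int) (x : Char),
    x ∈ pvChars pre → pvFirstIdx s pre x ≠ none := by
  intro pre
  induction pre with
  | nil => intro s x h; simp [pvChars] at h
  | cons c pre ih =>
    intro s x h
    simp only [pvFirstIdx]
    by_cases hc : x ∈ c.toList
    · simp [hc]
    · rw [if_neg hc]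
      apply ih
      simp only [pvChars, List.flatMap_cons, List.mem_append] at h
      rcases h with h | h
      · exact absurd h hc
      · exact h

theorem outer_get? : ∀ (cs : List String) (s : Int) (d : PySem.Dict Char Int) (y : Char),
      ((PySem.List.enumerate cs s).foldl
        (fun d p => p.2.toList.foldl (fun d x => if d.contains x then d else d.insert x p.1) d)
        d).get? y =
        if d.contains y then d.get? y else pvFirstIdx s cs y := by
  intro cs
  induction cs with
  | nil =>
    intro s d y
    by_cases h : d.contains y <;>
      simp [PySem.List.enumerate_nil, pvFirstIdx, h, PySem.Dict.get?_eq_none_iff_contains]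
  | cons c rest ih =>
    intro s d y
    rw [PySem.List.enumerate_cons, List.foldl_cons, ih]
    have hg := inner_get? c.toList d s y
    have hcont : (c.toList.foldl (fun d x => if d.contains x then d else d.insert x s) d).contains y
        = (d.contains y || decide (y ∈ c.toList)) := by
      rw [PySem.Dict.contains_eq_isSome_get?, hg]
      by_cases hd : d.contains y
      · rw [if_pos hd]
        have hd' : (d.get? y).isSome = true := by
          rw [← PySem.Dict.contains_eq_isSome_get?]; exact hd
        simp [hd, hd']
      · by_cases hc : y ∈ c.toList <;> simp [hd, hc]
    rw [hcont, hg]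
    simp only [pvFirstIdx]
    by_cases hd : d.contains y
    · simp [hd]
    · by_cases hc : y ∈ c.toList <;> simp [hd, hc]

theorem fi_get? (contacts : List String) (y : Char) :
    (solveFirstIndex contacts).get? y = pvFirstIdx 0 contacts y := by
  rw [solveFirstIndex, outer_get?]
  simp [PySem.Dict.contains_empty]

theorem solveB_count (contacts : List String) :
    ∀ (rest pre : List String), contacts = pre ++ rest → ∀ (acc : Int),
      ((PySem.List.enumerate rest (pre.length : Int)).foldl
        (fun count p => if p.2.toList.all (fun x => (solveFirstIndex contacts).getD x (-1) == p.1)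
                        then count + 1 else count) acc) = acc + pvSpec (pvChars pre) rest := by
  intro rest
  induction rest with
  | nil => intro pre h acc; simp [PySem.List.enumerate_nil, pvSpec]
  | cons c rest ih =>
    intro pre h acc
    rw [PySem.List.enumerate_cons, List.foldl_cons]
    have hcond : (c.toList.all fun x => (solveFirstIndex contacts).getD x (-1) == (pre.length : Int)) =
        (c.toList.all fun x => decide (x ∉ pvChars pre)) := by
      apply pvAll_congr
      intro x hx
      rw [PySem.Dict.getD_eq_get?_getD, fi_get?, h, pvFirstIdx_append]
      by_cases hp : x ∈ pvChars pre
      · rw [if_pos hp]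
        simp only [hp, decide_not, decide_true, Bool.not_true]
        cases hj : pvFirstIdx 0 pre x with
        | none => exact absurd hj (pvFirstIdx_mem pre 0 x hp)
        | some j =>
          obtain ⟨h0, hb⟩ := pvFirstIdx_some pre 0 j x hj
          simp only [Option.getD_some]
          have : j ≠ (pre.length : Int) := by omega
          simp [this]
      · rw [if_neg hp]
        simp only [zero_add, pvFirstIdx, hx, if_pos, Option.getD_some]
        simp [hp]
    rw [hcond]
    have hpre : contacts = (pre ++ [c]) ++ rest := by rw [h]; simp
    have := ih (pre ++ [c]) hpre
    simp only [List.length_append, List.length_cons, List.length_nil, zero_add, Nat.cast_add,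
      Nat.cast_one, pvChars, List.flatMap_append, List.flatMap_cons, List.flatMap_nil,
      List.append_nil] at this
    simp only [pvSpec]
    split
    · rw [show (pre.length : Int) + 1 = ((pre.length + 1 : Nat) : Int) by push_cast; ring] at this ⊢
      rw [this (acc + 1), pvChars]
      ring
    · rw [show (pre.length : Int) + 1 = ((pre.length + 1 : Nat) : Int) by push_cast; ring] at this ⊢
      rw [this acc, pvChars]
      ring

-- ===== VERDICT (by name: the statement is the Claim_ definition above) =====
theorem solve_spec : Claim_equal_solve := by
  intro contacts _
  unfold Spec_solve solve solve_alt
  rw [solveA_eq contacts PySem.Set.empty [] 0 (fun x => by simp [PySem.Set.empty])]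
  have hB := solveB_count contacts contacts [] rfl 0
  simp only [List.length_nil, Nat.cast_zero, pvChars, List.flatMap_nil, zero_add] at hB
  simpa using hB.symm
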